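-- pv_equiv track=rewrite | github.com/jugunwoo/python | Cos Pro 2/테스트.py | solution
-- ===== SOURCE A (Python) =====
-- def solution(attack,recovery,hp):
--     count=0
--     while True:
--         count+=1
--         hp-=attack
--         hp+=recovery
--         if hp<=0:
--             break
--     return count
-- ===== SOURCE B (Python) =====
-- def solution(attack, recovery, hp):
--     d = attack - recovery
--     if hp <= d:
--         return 1
--     return -(-hp // d)
-- ===== Notes on version B (the rewrite author's own statement) =====
-- stated objective: alternative
-- what changed: Replaces the iterated-subtraction while-loop with the closed form: 1 if hp <= attack-recovery, else ceil(hp/(attack-recovery)) computed as -(-hp // d).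
import Mathlib
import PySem

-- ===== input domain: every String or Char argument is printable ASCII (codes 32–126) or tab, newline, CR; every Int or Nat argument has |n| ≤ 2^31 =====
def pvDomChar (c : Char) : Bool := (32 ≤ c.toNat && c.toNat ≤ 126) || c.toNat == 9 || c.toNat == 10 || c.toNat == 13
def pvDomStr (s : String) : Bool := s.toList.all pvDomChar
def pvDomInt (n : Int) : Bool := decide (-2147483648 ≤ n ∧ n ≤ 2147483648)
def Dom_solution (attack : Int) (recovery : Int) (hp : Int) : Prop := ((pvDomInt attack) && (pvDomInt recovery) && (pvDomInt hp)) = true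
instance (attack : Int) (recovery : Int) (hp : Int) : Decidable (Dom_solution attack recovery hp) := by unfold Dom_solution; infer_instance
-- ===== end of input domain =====

-- B replaces A's iterated-subtraction loop by the closed form max(1, ceil(hp/(attack-recovery))) (a different, loop-free algorithm).


-- ===== PORT A =====
-- A's `while True` loop, with a fuel bound of 2^32; under Pre_solution and Dom_solution
-- the loop terminates in at most 2^31 iterations, so the fuel is never exhausted.
def solutionLoop (attack : Int) (recovery : Int) : Nat → Int → Int → Int
  | 0, count, _ => count
  | fuel + 1, count, hp =>
      let count := count + 1
      let hp := hp - attack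
      let hp := hp + recovery
      if hp ≤ 0 then count else solutionLoop attack recovery fuel count hp

def solution (attack : Int) (recovery : Int) (hp : Int) : Int :=
  solutionLoop attack recovery (2 ^ 32) 0 hp

-- ===== PORT B =====
def solution_alt (attack : Int) (recovery : Int) (hp : Int) : Int :=
  let d := attack - recovery
  if hp ≤ d then 1 else -(PySem.Int.floordiv (-hp) d)

-- ===== PRECONDITION & SPEC =====
-- Pre_ excludes exactly the inputs where A loops forever: net damage ≤ 0 while the first hit does not finish.
def Pre_solution (attack : Int) (recovery : Int) (hp : Int) : Prop :=
  1 ≤ attack - recovery ∨ hp ≤ attack - recovery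
instance (attack : Int) (recovery : Int) (hp : Int) : Decidable (Pre_solution attack recovery hp) := by unfold Pre_solution; infer_instance
def pvWitness_solution : Int × Int × Int := (3, 1, 10)

def Spec_solution (attack : Int) (recovery : Int) (hp : Int) (out : Int) : Prop := out = solution_alt attack recovery hp
instance (attack : Int) (recovery : Int) (hp : Int) (out : Int) : Decidable (Spec_solution attack recovery hp out) := by unfold Spec_solution; infer_instance

-- ===== CLAIM (what is proved, stated in full; the proofs are below) =====
def Claim_equal_solution : Prop := ∀ (attack : Int) (recovery : Int) (hp : Int), Dom_solution attack recovery hp → Pre_solution attack recovery hp → Spec_solution attack recovery hp (solution attack recovery hp)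

-- ===== LEMMAS AND PROOFS =====

-- One iteration finishes the fight when hp ≤ attack - recovery.
lemma solutionLoop_one (attack recovery : Int) (fuel : Nat) (count hp : Int)
    (h : hp - attack + recovery ≤ 0) :
    solutionLoop attack recovery (fuel + 1) count hp = count + 1 := by
  simp [solutionLoop, h]

-- Closed form of the loop when the net damage d = attack - recovery is positive
-- and the fuel exceeds hp.
lemma solutionLoop_closed (attack recovery : Int) (hd : 1 ≤ attack - recovery) :
    ∀ (fuel : Nat) (count hp : Int), 1 ≤ fuel → hp ≤ (fuel : Int) →
      solutionLoop attack recovery fuel count hp =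
        count + (if hp ≤ attack - recovery then 1
                 else -(PySem.Int.floordiv (-hp) (attack - recovery))) := by
  intro fuel
  induction fuel with
  | zero => intro count hp h1 _; omega
  | succ f ih =>
    intro count hp _ hle
    set d := attack - recovery with hdd
    have hb : (0 : Int) < d := by omega
    by_cases hcase : hp ≤ d
    · rw [if_pos hcase, solutionLoop_one attack recovery f count hp (by omega)]
    · rw [if_neg hcase]
      have hstep : solutionLoop attack recovery (f + 1) count hp
          = solutionLoop attack recovery f (count + 1) (hp - d) := by
        have hpos : ¬ (hp - attack + recovery ≤ 0) := by omega
        simp only [solutionLoop, hpos, if_false]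
        (congr 1; omega)
      have hf1 : 1 ≤ f := by
        have : (2 : Int) ≤ hp := by omega
        have : (1 : Int) ≤ (f : Int) := by push_cast at hle ⊢; omega
        exact_mod_cast this
      have hle' : hp - d ≤ (f : Int) := by push_cast at hle ⊢; omega
      rw [hstep, ih (count + 1) (hp - d) hf1 hle']
      by_cases h2 : hp - d ≤ d
      · rw [if_pos h2]
        have hq : -(PySem.Int.floordiv (-hp) d) = 2 :=
          (PySem.Int.neg_floordiv_neg_eq_iff_of_pos hb).mpr ⟨by nlinarith, by nlinarith⟩
        rw [hq]; ring
      · rw [if_neg h2]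
        set q := -(PySem.Int.floordiv (-(hp - d)) d) with hqdef
        have hqb : (q - 1) * d < hp - d ∧ hp - d ≤ q * d :=
          (PySem.Int.neg_floordiv_neg_eq_iff_of_pos hb).mp hqdef.symm
        have hq' : -(PySem.Int.floordiv (-hp) d) = q + 1 :=
          (PySem.Int.neg_floordiv_neg_eq_iff_of_pos hb).mpr ⟨by nlinarith [hqb.1], by nlinarith [hqb.2]⟩
        rw [hq']; ring

-- ===== VERDICT (by name: the statement is the Claim_ definition above) =====
theorem solution_spec : Claim_equal_solution := by
  intro attack recovery hp hdom hpre
  unfold Spec_solution solution solution_alt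
  simp only [Dom_solution, pvDomInt, Bool.and_eq_true, decide_eq_true_eq] at hdom
  obtain ⟨f, hf⟩ : ∃ f, (2 ^ 32 : Nat) = f + 1 := ⟨2 ^ 32 - 1, by norm_num⟩
  rcases hpre with hd | hone
  · rw [solutionLoop_closed attack recovery hd (2 ^ 32) 0 hp (by norm_num)
      (by push_cast; omega)]
    simp
  · rw [hf, solutionLoop_one attack recovery f 0 hp (by omega)]
    simp [hone]
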